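-- pv_equiv track=rewrite | github.com/pwd491/www | backend/services/amneziawg.py | _parse_client_conf_addresses
-- ===== SOURCE A (Python) =====
-- def _parse_client_conf_addresses(address_line: str) -> tuple[str | None, str | None]:
--     ipv4: str | None = None
--     ipv6: str | None = None
--     for part in address_line.split(","):
--         p = part.strip()
--         if not p:
--             continue
--         if "/" in p:
--             addr, _ = p.split("/", 1)
--         else:
--             addr = p
--         addr = addr.strip()
--         if ":" in addr:
--             ipv6 = addr
--         elif "." in addr:
--             ipv4 = addr
--     return ipv4, ipv6
-- ===== SOURCE B (Python) =====
-- def _parse_client_conf_addresses(address_line: str) -> tuple[str | None, str | None]: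
--     cleaned = []
--     for part in address_line.split(","):
--         p = part.strip()
--         if p:
--             cleaned.append(p.split("/", 1)[0].strip())
--     ipv6 = next((a for a in reversed(cleaned) if ":" in a), None)
--     ipv4 = next((a for a in reversed(cleaned) if "." in a and ":" not in a), None)
--     return ipv4, ipv6
-- ===== Notes on version B (the rewrite author's own statement) =====
-- stated objective: alternative
-- what changed: Replaced the single stateful fold carrying both results with a normalize-then-query pipeline: build the cleaned address list once, then pick ipv6 and ipv4 as the first match of a reversed scan each.
import Mathlib
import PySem

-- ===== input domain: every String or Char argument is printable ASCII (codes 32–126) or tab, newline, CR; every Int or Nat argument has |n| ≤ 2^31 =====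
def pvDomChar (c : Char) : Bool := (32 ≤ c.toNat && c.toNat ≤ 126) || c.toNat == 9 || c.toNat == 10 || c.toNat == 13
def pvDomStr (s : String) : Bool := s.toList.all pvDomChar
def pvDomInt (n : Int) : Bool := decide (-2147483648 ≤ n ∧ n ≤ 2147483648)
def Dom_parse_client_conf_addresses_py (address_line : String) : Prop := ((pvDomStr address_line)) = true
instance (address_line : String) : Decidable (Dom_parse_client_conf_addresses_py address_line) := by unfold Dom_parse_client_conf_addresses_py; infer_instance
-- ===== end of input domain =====

-- B restructures A's single stateful fold into a normalize-once cleaned list followed by two reversed scans (alternative decomposition, same return value).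

-- ===== PORT A =====
-- A's loop body: state (ipv4, ipv6), one comma-separated part at a time.
def pvStepA (st : Option String × Option String) (part : String) : Option String × Option String :=
  let p := PySem.Str.strip part
  if p = "" then st
  else
    let addr := if PySem.Str.isIn "/" p then (((PySem.Str.splitMax? p "/" 1).getD []).headD "") else p
    let addr := PySem.Str.strip addr
    if PySem.Str.isIn ":" addr then (st.1, some addr)
    else if PySem.Str.isIn "." addr then (some addr, st.2)
    else st

def parse_client_conf_addresses_py (address_line : String) : Option String × Option String :=
  ((PySem.Str.split? address_line ",").getD []).foldl pvStepA (none, none)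

-- ===== PORT B =====
-- B: clean one part (strip, drop the '/suffix' via split('/',1)[0], strip); none for empty parts.
def pvClean (part : String) : Option String :=
  let p := PySem.Str.strip part
  if p = "" then none
  else some (PySem.Str.strip (((PySem.Str.splitMax? p "/" 1).getD []).headD ""))

def parse_client_conf_addresses_py_alt (address_line : String) : Option String × Option String :=
  let cleaned := ((PySem.Str.split? address_line ",").getD []).filterMap pvClean
  let ipv6 := cleaned.reverse.find? (fun a => PySem.Str.isIn ":" a)
  let ipv4 := cleaned.reverse.find? (fun a => PySem.Str.isIn "." a && !PySem.Str.isIn ":" a)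
  (ipv4, ipv6)

-- ===== PRECONDITION & SPEC =====
def Spec_parse_client_conf_addresses_py (address_line : String) (out : Option String × Option String) : Prop := out = parse_client_conf_addresses_py_alt address_line
instance (address_line : String) (out : Option String × Option String) : Decidable (Spec_parse_client_conf_addresses_py address_line out) := by unfold Spec_parse_client_conf_addresses_py; infer_instance

-- ===== CLAIM (what is proved, stated in full; the proofs are below) =====
def Claim_equal_parse_client_conf_addresses_py : Prop := ∀ (address_line : String), Dom_parse_client_conf_addresses_py address_line → Spec_parse_client_conf_addresses_py address_line (parse_client_conf_addresses_py address_line)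

-- ===== LEMMAS AND PROOFS =====

-- split('/',1) when '/' does not occur: the go loop never matches the separator.
theorem pvGo_nosep (c : Char) (fuel : Nat) : ∀ (l cur : List Char) (acc : List (List Char)),
    l.length < fuel → c ∉ l →
    PySem.Chars.splitOnMax.go [c] fuel 1 l cur acc = ((cur.reverse ++ l) :: acc).reverse := by
  induction fuel with
  | zero => intro l cur acc h _; omega
  | succ n ih =>
    intro l cur acc h hmem
    cases l with
    | nil => simp [PySem.Chars.splitOnMax.go]
    | cons x rest =>
      have hx : x ≠ c := fun hxc => hmem (hxc ▸ List.mem_cons_self)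
      have hpre : [c].isPrefixOf (x :: rest) = false := by
        simp [List.isPrefixOf]
        exact fun hcx => absurd hcx.symm hx
      simp only [PySem.Chars.splitOnMax.go, hpre]
      rw [if_neg (by omega), if_neg (by simp)]
      rw [ih rest (x :: cur) acc (by simpa using Nat.lt_of_succ_lt_succ h)
          (fun hm => hmem (List.mem_cons_of_mem x hm))]
      simp

theorem pvSplitMax_nosep (p : String) (h : PySem.Str.isIn "/" p = false) :
    PySem.Str.splitMax? p "/" 1 = some [p] := by
  have hmem : '/' ∉ p.toList := by
    have h' : PySem.Chars.isIn "/".toList p.toList = false := by simpa using h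
    rw [PySem.Chars.isIn_eq_false_iff] at h'
    exact fun hm => h' ((List.singleton_infix_iff '/' p.toList).mpr hm)
  have hchars : PySem.Chars.splitOnMax p.toList ['/'] 1 = [p.toList] := by
    unfold PySem.Chars.splitOnMax
    rw [if_neg (by norm_num)]
    simpa using pvGo_nosep '/' (p.toList.length + 1) p.toList [] [] (by omega) hmem
  show Option.map _ (PySem.Chars.splitMax? p.toList ['/'] 1) = _
  unfold PySem.Chars.splitMax?
  simp [hchars, String.ofList_toList]

-- A's conditional address extraction equals B's unconditional one.
theorem pvAddr_eq (p : String) :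
    (if PySem.Str.isIn "/" p then (((PySem.Str.splitMax? p "/" 1).getD []).headD "") else p)
      = (((PySem.Str.splitMax? p "/" 1).getD []).headD "") := by
  cases hc : PySem.Str.isIn "/" p with
  | true => rfl
  | false => rw [if_neg (by simp), pvSplitMax_nosep p hc]; rfl

theorem pvElim_id {α : Type} (o : Option α) : o.elim none some = o := by cases o <;> rfl

theorem pvOr_elim {α β : Type} (o t : Option α) (d : β) (f : α → β) :
    (o.or t).elim d f = o.elim (t.elim d f) f := by cases o <;> simp

-- A's fold over any part list = B's two reversed scans over the cleaned list,
-- with the accumulator as the not-found default.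
theorem pvFold_eq (parts : List String) (st : Option String × Option String) :
    parts.foldl pvStepA st =
      ((((parts.filterMap pvClean).reverse.find?
            (fun a => PySem.Str.isIn "." a && !PySem.Str.isIn ":" a)).elim st.1 some),
       (((parts.filterMap pvClean).reverse.find?
            (fun a => PySem.Str.isIn ":" a)).elim st.2 some)) := by
  induction parts generalizing st with
  | nil => simp
  | cons x xs ih =>
    simp only [List.foldl_cons, List.filterMap_cons]
    rw [ih]
    unfold pvStepA pvClean
    by_cases hp : PySem.Str.strip x = ""
    · simp [hp]
    · simp only [hp, if_false, pvAddr_eq]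
      set a := PySem.Str.strip (((PySem.Str.splitMax? (PySem.Str.strip x) "/" 1).getD []).headD "") with ha
      simp only [List.reverse_cons, List.find?_append, pvOr_elim]
      by_cases h6 : PySem.Chars.isIn [':'] a.toList = true
      · simp [List.find?, h6]
      · by_cases h4 : PySem.Chars.isIn ['.'] a.toList = true
        · simp [List.find?, h6, h4]
        · simp [List.find?, h6, h4]

-- ===== VERDICT (by name: the statement is the Claim_ definition above) =====
theorem parse_client_conf_addresses_py_spec : Claim_equal_parse_client_conf_addresses_py := by
  intro line _
  unfold Spec_parse_client_conf_addresses_py parse_client_conf_addresses_py parse_client_conf_addresses_py_alt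
  rw [pvFold_eq]
  simp only [pvElim_id]
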